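-- pv_equiv track=rewrite | github.com/neymareleven/loyalty_engine | app/routes/event_types.py | _slug_key
-- ===== SOURCE A (Python) =====
-- def _slug_key(value: str) -> str:
--     s = (value or "").strip().lower()
--     out = []
--     prev_us = False
--     for ch in s:
--         ok = ("a" <= ch <= "z") or ("0" <= ch <= "9")
--         if ok:
--             out.append(ch)
--             prev_us = False
--         else:
--             if not prev_us:
--                 out.append("_")
--                 prev_us = True
--     key = "".join(out).strip("_")
--     return key or "transaction"
-- ===== SOURCE B (Python) =====
-- def _slug_key(value: str) -> str:
--     s = (value or "").strip().lower()
--     out = ""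
--     i, n = 0, len(s)
--     while i < n:
--         ok = "a" <= s[i] <= "z" or "0" <= s[i] <= "9"
--         j = i + 1
--         while j < n and (("a" <= s[j] <= "z" or "0" <= s[j] <= "9") == ok):
--             j += 1
--         out += s[i:j] if ok else "_"
--         i = j
--     key = out.strip("_")
--     return key or "transaction"
-- ===== Notes on version B (the rewrite author's own statement) =====
-- stated objective: alternative
-- what changed: Replaces A's per-character loop with a prev_us flag by a two-pointer run scanner: each maximal alphanumeric run is appended as one slice and each maximal non-alphanumeric run as a single underscore, so no per-character state flag is maintained.
import Mathlib
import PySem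

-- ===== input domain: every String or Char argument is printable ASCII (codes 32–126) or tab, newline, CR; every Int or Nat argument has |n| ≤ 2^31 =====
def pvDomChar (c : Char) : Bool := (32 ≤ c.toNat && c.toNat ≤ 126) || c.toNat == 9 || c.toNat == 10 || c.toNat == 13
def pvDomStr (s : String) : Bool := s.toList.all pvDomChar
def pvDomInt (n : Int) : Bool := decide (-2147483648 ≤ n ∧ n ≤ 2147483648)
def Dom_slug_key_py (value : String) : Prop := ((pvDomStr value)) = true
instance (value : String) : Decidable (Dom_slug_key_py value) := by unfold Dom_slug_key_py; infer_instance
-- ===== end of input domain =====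

-- B replaces A's per-character loop with prev_us flag by a two-pointer run scanner (alternative, same cost).


-- ===== PORT A =====
-- body of A's for-loop: state = (out, prev_us)
def slugStepA (st : List Char × Bool) (ch : Char) : List Char × Bool :=
  let ok : Bool := ('a' ≤ ch && ch ≤ 'z') || ('0' ≤ ch && ch ≤ '9')
  if ok then (st.1 ++ [ch], false)
  else if st.2 then st else (st.1 ++ ['_'], true)

def slug_key_py (value : String) : String :=
  let v := if value = "" then "" else value
  let s := PySem.Str.lower (PySem.Str.strip v)
  let res := s.toList.foldl slugStepA ([], false)
  let key := PySem.Str.stripChars (String.ofList res.1) "_"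
  if key = "" then "transaction" else key

-- ===== PORT B =====
def okChB (c : Char) : Bool := ('a' ≤ c && c ≤ 'z') || ('0' ≤ c && c ≤ '9')

-- inner while of B: advance j past the run whose ok-status is `ok`
-- (fuel-totalized while loop; fuel = s.length always suffices since j increases each step)
def runEndB (s : List Char) (ok : Bool) : Nat → Nat → Nat
  | 0, j => j
  | fuel + 1, j =>
    if h : j < s.length then
      if okChB s[j] == ok then runEndB s ok fuel (j + 1) else j
    else j

-- outer while of B (fuel-totalized; fuel = s.length suffices since i advances by ≥ 1)
def slugLoopB (s : List Char) : Nat → Nat → List Char → List Char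
  | 0, _, out => out
  | fuel + 1, i, out =>
    if h : i < s.length then
      let ok := okChB s[i]
      let j := runEndB s ok s.length (i + 1)
      slugLoopB s fuel j (out ++ (if ok then PySem.List.slice s (some (i : Int)) (some (j : Int)) else ['_']))
    else out

def slug_key_py_alt (value : String) : String :=
  let v := if value = "" then "" else value
  let s := PySem.Str.lower (PySem.Str.strip v)
  let out := slugLoopB s.toList s.toList.length 0 []
  let key := PySem.Str.stripChars (String.ofList out) "_"
  if key = "" then "transaction" else key

-- ===== PRECONDITION & SPEC =====
def Spec_slug_key_py (value : String) (out : String) : Prop := out = slug_key_py_alt value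
instance (value : String) (out : String) : Decidable (Spec_slug_key_py value out) := by unfold Spec_slug_key_py; infer_instance

-- ===== CLAIM (what is proved, stated in full; the proofs are below) =====
def Claim_equal_slug_key_py : Prop := ∀ (value : String), Dom_slug_key_py value → Spec_slug_key_py value (slug_key_py value)

-- ===== LEMMAS AND PROOFS =====

-- canonical run-collapsing recursion both ports are reduced to
def subRunsH : List Char → List Char
  | [] => []
  | c :: cs =>
    if okChB c then c :: subRunsH cs
    else '_' :: subRunsH (cs.dropWhile (fun x => !okChB x))
termination_by l => l.length
decreasing_by
  · simp
  · have := List.length_dropWhile_le (fun x => !okChB x) cs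
    simp; omega

lemma subRunsH_cons (c : Char) (cs : List Char) :
    subRunsH (c :: cs) = if okChB c then c :: subRunsH cs
      else '_' :: subRunsH (cs.dropWhile (fun x => !okChB x)) := by
  rw [subRunsH]

lemma foldA_spec (s : List Char) : ∀ acc : List Char,
    (List.foldl slugStepA (acc, false) s).1 = acc ++ subRunsH s ∧
    (List.foldl slugStepA (acc, true) s).1 = acc ++ subRunsH (s.dropWhile (fun x => !okChB x)) := by
  induction s with
  | nil => intro acc; simp [subRunsH]
  | cons c cs ih =>
    intro acc
    by_cases h : okChB c = true
    · have h' := h; simp only [okChB] at h'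
      constructor
      · rw [List.foldl_cons, show slugStepA (acc, false) c = (acc ++ [c], false) from by
            simp [slugStepA, h'], (ih (acc ++ [c])).1, subRunsH_cons, if_pos h]
        simp
      · rw [List.foldl_cons, show slugStepA (acc, true) c = (acc ++ [c], false) from by
            simp [slugStepA, h'], (ih (acc ++ [c])).1,
           List.dropWhile_cons, if_neg (by simp [h]), subRunsH_cons, if_pos h]
        simp
    · simp only [Bool.not_eq_true] at h
      have h' := h; simp only [okChB] at h'
      constructor
      · rw [List.foldl_cons, show slugStepA (acc, false) c = (acc ++ ['_'], true) from by
            simp [slugStepA, h'], (ih (acc ++ ['_'])).2, subRunsH_cons, if_neg (by simp [h])]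
        simp
      · rw [List.foldl_cons, show slugStepA (acc, true) c = (acc, true) from by
            simp [slugStepA, h'], (ih acc).2,
           List.dropWhile_cons, if_pos (by simp [h])]

lemma subRunsH_takeWhile (u : List Char) :
    u.takeWhile okChB ++ subRunsH (u.dropWhile okChB) = subRunsH u := by
  induction u with
  | nil => simp
  | cons c cs ih =>
    by_cases h : okChB c = true
    · rw [List.takeWhile_cons, if_pos h, List.dropWhile_cons, if_pos h,
          subRunsH_cons, if_pos h]
      simpa using ih
    · simp only [Bool.not_eq_true] at h
      rw [List.takeWhile_cons, if_neg (by simp [h]), List.dropWhile_cons, if_neg (by simp [h])]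
      simp

lemma le_runEndB (s : List Char) (ok : Bool) :
    ∀ (fuel j : Nat), j ≤ runEndB s ok fuel j := by
  intro fuel
  induction fuel with
  | zero => intro j; rfl
  | succ f ih =>
    intro j
    rw [runEndB]
    by_cases h : j < s.length
    · rw [dif_pos h]
      by_cases hok : (okChB s[j] == ok) = true
      · rw [if_pos hok]; have := ih (j + 1); omega
      · rw [if_neg hok]
    · rw [dif_neg h]

lemma runEndB_spec (s : List Char) (ok : Bool) :
    ∀ (fuel j : Nat), s.length - j ≤ fuel →
      runEndB s ok fuel j = j + ((s.drop j).takeWhile (fun c => okChB c == ok)).length := by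
  intro fuel
  induction fuel with
  | zero =>
    intro j hf
    rw [runEndB, List.drop_eq_nil_of_le (by omega)]
    simp
  | succ f ih =>
    intro j hf
    rw [runEndB]
    by_cases h : j < s.length
    · rw [dif_pos h]
      by_cases hok : (okChB s[j] == ok) = true
      · rw [if_pos hok, ih (j + 1) (by omega), List.drop_eq_getElem_cons h,
            List.takeWhile_cons, if_pos hok]
        simp; omega
      · rw [if_neg hok, List.drop_eq_getElem_cons h, List.takeWhile_cons, if_neg hok]
        simp
    · rw [dif_neg h, List.drop_eq_nil_of_le (by omega)]
      simp

lemma take_length_takeWhile (p : Char → Bool) (l : List Char) :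
    l.take (l.takeWhile p).length = l.takeWhile p := by
  induction l with
  | nil => simp
  | cons c cs ih =>
    by_cases h : p c = true
    · simp [h, ih]
    · simp [h]

lemma dropWhile_eq_drop (p : Char → Bool) (l : List Char) :
    l.dropWhile p = l.drop (l.takeWhile p).length := by
  induction l with
  | nil => simp
  | cons c cs ih =>
    by_cases h : p c = true
    · simp [h, ih]
    · simp [h]

lemma loopB_spec (s : List Char) :
    ∀ (fuel i : Nat) (out : List Char), s.length - i ≤ fuel →
      slugLoopB s fuel i out = out ++ subRunsH (s.drop i) := by
  intro fuel
  induction fuel with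
  | zero =>
    intro i out hf
    rw [slugLoopB, List.drop_eq_nil_of_le (by omega)]
    simp [subRunsH]
  | succ f ih =>
    intro i out hf
    by_cases h : i < s.length
    · rw [slugLoopB]
      simp only [h, dif_pos]
      have hb : s.length - runEndB s (okChB s[i]) s.length (i + 1) ≤ f := by
        have := le_runEndB s (okChB s[i]) s.length (i + 1); omega
      rw [ih _ _ hb, List.append_assoc]
      congr 1
      have hdrop : s.drop i = s[i] :: s.drop (i + 1) := List.drop_eq_getElem_cons h
      by_cases hok : okChB s[i] = true
      · have hj : runEndB s (okChB s[i]) s.length (i + 1)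
            = i + 1 + ((s.drop (i + 1)).takeWhile okChB).length := by
          rw [runEndB_spec s _ s.length (i + 1) (by omega), hok]; simp
        rw [if_pos hok, hj, PySem.List.slice_natCast]
        have h1 : i + 1 + ((s.drop (i + 1)).takeWhile okChB).length - i
            = ((s.drop (i + 1)).takeWhile okChB).length + 1 := by omega
        have h2 : List.drop (i + 1 + ((s.drop (i + 1)).takeWhile okChB).length) s
            = List.drop (((s.drop (i + 1)).takeWhile okChB).length) (List.drop (i + 1) s) := by
          rw [List.drop_drop]
        rw [h1, hdrop, List.take_succ_cons, take_length_takeWhile, h2, ← dropWhile_eq_drop]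
        rw [show s[i] :: List.drop (i + 1) s = s.drop i from hdrop.symm]
        rw [hdrop, subRunsH_cons, if_pos hok, List.cons_append, subRunsH_takeWhile]
      · rw [if_neg hok]
        simp only [Bool.not_eq_true] at hok
        have hj : runEndB s (okChB s[i]) s.length (i + 1)
            = i + 1 + ((s.drop (i + 1)).takeWhile (fun c => !okChB c)).length := by
          rw [runEndB_spec s _ s.length (i + 1) (by omega), hok]; simp
        have h2 : List.drop (i + 1 + ((s.drop (i + 1)).takeWhile (fun c => !okChB c)).length) s
            = List.drop (((s.drop (i + 1)).takeWhile (fun c => !okChB c)).length)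
                (List.drop (i + 1) s) := by
          rw [List.drop_drop]
        rw [hj, h2, ← dropWhile_eq_drop, hdrop, subRunsH_cons, if_neg (by simp [hok])]
        rfl
    · rw [slugLoopB, dif_neg h, List.drop_eq_nil_of_le (by omega)]
      simp [subRunsH]

lemma core_eq (l : List Char) :
    (List.foldl slugStepA ([], false) l).1 = slugLoopB l l.length 0 [] := by
  rw [(foldA_spec l []).1, loopB_spec l l.length 0 [] (by omega)]
  simp

-- ===== VERDICT (by name: the statement is the Claim_ definition above) =====
theorem slug_key_py_spec : Claim_equal_slug_key_py := by
  intro value _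
  show slug_key_py value = slug_key_py_alt value
  simp only [slug_key_py, slug_key_py_alt, core_eq]
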